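-- pv_equiv track=rewrite | github.com/rrpg/engine | Rpg.py | parseTypedAction
-- ===== SOURCE A (Python) =====
-- def parseTypedAction(action):
-- 	inOption = False
--
-- 	commands, sep, option, optionStart = list(), ' ', '', 0
-- 	commandLen = len(action)
-- 	for k,i in enumerate(action):
-- 		# first letter of the option
-- 		if i != ' ' and not inOption:
-- 			#~ Set the start index of the option
-- 			optionStart = k
-- 			inOption = True
-- 			#~ Set the option delimiter
-- 			sep = i if i in ("'", '"') else ' '
-- 		if inOption:
-- 			#~ If the current char is the option delimiter, but not the
-- 			#~ stat one
-- 			if i == sep and k > optionStart: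
-- 				#~ The option is ended
-- 				inOption = False
-- 			elif i != sep:
-- 				option += i
--
-- 			#~ The option is complete, append it in the list
-- 			if not inOption or k == commandLen - 1:
-- 				commands.append(option)
-- 				option = ''
--
-- 	return commands
-- ===== SOURCE B (Python) =====
-- def parseTypedAction(action):
-- 	commands = []
-- 	i, n = 0, len(action)
-- 	while i < n:
-- 		c = action[i]
-- 		if c == ' ':
-- 			i += 1
-- 			continue
-- 		if c in ("'", '"'):
-- 			delim, start = c, i + 1
-- 		else:
-- 			delim, start = ' ', i
-- 		p = action.find(delim, start)
-- 		if p == -1: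
-- 			commands.append(action[start:])
-- 			break
-- 		commands.append(action[start:p])
-- 		i = p + 1
-- 	return commands
-- ===== Notes on version B (the rewrite author's own statement) =====
-- stated objective: faster
-- what changed: Replaced the per-character inOption flag/accumulator state machine over enumerate(action) with a two-pointer scanner that skips spaces, picks the delimiter from the current char, locates the closing delimiter with str.find and slices the token out.
import Mathlib
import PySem

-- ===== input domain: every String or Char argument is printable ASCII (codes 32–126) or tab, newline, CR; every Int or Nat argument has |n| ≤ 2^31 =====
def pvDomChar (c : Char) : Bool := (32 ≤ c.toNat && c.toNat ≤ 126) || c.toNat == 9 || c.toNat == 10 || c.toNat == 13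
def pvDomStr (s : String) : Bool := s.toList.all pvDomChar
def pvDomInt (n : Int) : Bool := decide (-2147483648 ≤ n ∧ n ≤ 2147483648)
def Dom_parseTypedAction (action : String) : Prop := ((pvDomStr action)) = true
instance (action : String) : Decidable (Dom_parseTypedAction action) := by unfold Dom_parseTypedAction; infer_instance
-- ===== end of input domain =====

-- B replaces A's per-character flag/accumulator state machine with a two-pointer find-and-slice scanner (str.find + slicing); measured faster by a constant factor.

-- ===== PORT A =====
-- enumerate(action): hand-written, exact
def enumFrom : Nat → List Char → List (Nat × Char)
  | _, [] => []
  | k, c :: cs => (k, c) :: enumFrom (k + 1) cs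

-- the body of A's for-loop, step for step (state = (commands, sep, option, inOption, optionStart))
def stepA (n : Nat) (st : List String × Char × List Char × Bool × Nat) (ki : Nat × Char) :
    List String × Char × List Char × Bool × Nat :=
  let (commands, sep, option, inOption, optionStart) := st
  let (k, i) := ki
  -- if i != ' ' and not inOption: set optionStart, inOption, sep
  let optionStart := if i ≠ ' ' ∧ ¬ inOption then k else optionStart
  let sep' := if i ≠ ' ' ∧ ¬ inOption then (if i = '\'' ∨ i = '"' then i else ' ') else sep
  let inOption' := if i ≠ ' ' ∧ ¬ inOption then true else inOption
  if inOption' then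
    let inOption2 := if i = sep' ∧ k > optionStart then false else inOption'
    let option2 :=
      if i = sep' ∧ k > optionStart then option
      else if i ≠ sep' then option ++ [i] else option
    if ¬ inOption2 ∨ k = n - 1 then
      (commands ++ [String.mk option2], sep', [], inOption2, optionStart)
    else (commands, sep', option2, inOption2, optionStart)
  else (commands, sep', option, inOption', optionStart)

def parseTypedAction (action : String) : List String :=
  let cs := action.toList
  let commandLen := cs.length
  (List.foldl (stepA commandLen) ([], ' ', [], false, 0) (enumFrom 0 cs)).1

-- ===== PORT B =====
-- the while-loop of Source B as recursion on the scan index i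
def altGo (cs : List Char) (i : Nat) : List String :=
  if h : i < cs.length then
    let c := cs[i]
    if c = ' ' then altGo cs (i + 1)
    else
      let delim := if c = '\'' ∨ c = '"' then c else ' '
      let start := if c = '\'' ∨ c = '"' then i + 1 else i
      -- action.find(delim, start) ported as idxOf? on the dropped suffix
      match (cs.drop start).idxOf? delim with
      | none => [String.mk (cs.drop start)]
      | some j => String.mk ((cs.drop start).take j) :: altGo cs (start + j + 1)
  else []
termination_by cs.length - i
decreasing_by
  · omega
  · split <;> omega

def parseTypedAction_alt (action : String) : List String := altGo action.toList 0

-- ===== PRECONDITION & SPEC =====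
def Spec_parseTypedAction (action : String) (out : List String) : Prop := out = parseTypedAction_alt action
instance (action : String) (out : List String) : Decidable (Spec_parseTypedAction action out) := by unfold Spec_parseTypedAction; infer_instance

-- ===== CLAIM (what is proved, stated in full; the proofs are below) =====
def Claim_equal_parseTypedAction : Prop := ∀ (action : String), Dom_parseTypedAction action → Spec_parseTypedAction action (parseTypedAction action)

-- ===== LEMMAS AND PROOFS =====

-- result of A's loop, first component only
def runA (n : Nat) (acc : List String) (sep : Char) (o : List Char) (io : Bool) (s : Nat)
    (ps : List (Nat × Char)) : List String :=
  (List.foldl (stepA n) (acc, sep, o, io, s) ps).1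

-- what B produces for the in-token phase starting at index k with delimiter d and prefix o
def tokenRes (cs : List Char) (k : Nat) (d : Char) (o : List Char) : List String :=
  match (cs.drop k).idxOf? d with
  | none => [String.mk (o ++ cs.drop k)]
  | some j => String.mk (o ++ (cs.drop k).take j) :: altGo cs (k + j + 1)

theorem altGo_stop (cs : List Char) (i : Nat) (h : ¬ i < cs.length) : altGo cs i = [] := by
  rw [altGo]; simp [h]

theorem idxOf?_cons_char (c d : Char) (l : List Char) :
    List.idxOf? d (c :: l) = if c = d then some 0 else (List.idxOf? d l).map (· + 1) := by
  simp [List.idxOf?, List.findIdx?_cons]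

theorem tokenRes_cons (cs : List Char) (k : Nat) (d c : Char) (o : List Char)
    (hdk : cs.drop k = c :: cs.drop (k + 1)) (hcd : c ≠ d) :
    tokenRes cs k d o = tokenRes cs (k + 1) d (o ++ [c]) := by
  simp only [tokenRes, hdk, idxOf?_cons_char, if_neg hcd]
  cases hfi : (cs.drop (k + 1)).idxOf? d with
  | none => simp
  | some j =>
    simp only [Option.map_some]
    have hi : k + (j + 1) + 1 = k + 1 + j + 1 := by omega
    rw [hi, List.take_succ_cons]
    simp

theorem joint (cs : List Char) : ∀ (l : List Char) (k : Nat),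
    k + l.length = cs.length → l = cs.drop k →
    ((∀ acc sep s0, runA cs.length acc sep [] false s0 (enumFrom k l) = acc ++ altGo cs k) ∧
     (∀ acc d o s, s < k → l ≠ [] →
        runA cs.length acc d o true s (enumFrom k l) = acc ++ tokenRes cs k d o)) := by
  intro l
  induction l with
  | nil =>
    intro k hlen _
    refine ⟨?_, by intro _ _ _ _ _ hne; exact absurd rfl hne⟩
    intro acc sep s0
    have hk : ¬ k < cs.length := by simp at hlen; omega
    simp [runA, enumFrom, altGo_stop cs k hk]
  | cons c l' ih =>
    intro k hlen hdrop
    have hk : k < cs.length := by simp at hlen; omega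
    have hlen' : k + 1 + l'.length = cs.length := by simp at hlen; omega
    have hdrop' : l' = cs.drop (k + 1) := by
      have := congrArg List.tail hdrop
      simpa [List.tail_drop] using this
    have hc : cs[k] = c := by
      have h0 : (cs.drop k)[0]? = cs[k]? := by rw [List.getElem?_drop]; norm_num
      rw [← hdrop] at h0
      simp [List.getElem?_eq_getElem hk] at h0
      exact h0.symm
    obtain ⟨ih1, ih2⟩ := ih (k + 1) hlen' hdrop'
    simp only [runA] at ih1 ih2 ⊢
    constructor
    · -- not in option at k
      intro acc sep s0
      by_cases hsp : c = ' '
      · -- skip the space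
        have hstep : stepA cs.length (acc, sep, [], false, s0) (k, c) = (acc, sep, [], false, s0) := by
          simp [stepA, hsp]
        rw [altGo]
        simp only [enumFrom, List.foldl_cons, hstep, dif_pos hk, hc, if_pos hsp]
        exact ih1 acc sep s0
      · by_cases hq : c = '\'' ∨ c = '"'
        · -- quoted token opens at k; opening char is skipped
          have hstep : stepA cs.length (acc, sep, [], false, s0) (k, c) =
              (if k = cs.length - 1 then (acc ++ [String.mk []], c, [], true, k)
               else (acc, c, [], true, k)) := by
            simp [stepA, hsp, hq]
          rw [altGo]
          simp only [enumFrom, List.foldl_cons, hstep, dif_pos hk, hc, if_neg hsp, if_pos hq]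
          by_cases hlast : k = cs.length - 1
          · -- quote is the last char: A appends '' here; B finds no closing quote
            have hnil : l' = [] := List.length_eq_zero_iff.1 (by omega)
            have hdropn : cs.drop (k + 1) = [] := by rw [← hdrop', hnil]
            rw [if_pos hlast, hnil]
            simp [enumFrom, hdropn]
          · have hne' : l' ≠ [] := by
              intro hnil
              exact hlast (by rw [hnil] at hlen'; simp at hlen'; omega)
            rw [if_neg hlast, ih2 acc c [] k (Nat.lt_succ_self k) hne']
            congr 1
        · -- unquoted token opens at k; opening char belongs to the token
          have hstep : stepA cs.length (acc, sep, [], false, s0) (k, c) =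
              (if k = cs.length - 1 then (acc ++ [String.mk [c]], ' ', [], true, k)
               else (acc, ' ', [c], true, k)) := by
            simp [stepA, hsp, hq]
          have hidx : (cs.drop k).idxOf? ' ' = ((cs.drop (k + 1)).idxOf? ' ').map (· + 1) := by
            rw [← hdrop, hdrop', idxOf?_cons_char, if_neg hsp]
          rw [altGo]
          simp only [enumFrom, List.foldl_cons, hstep, dif_pos hk, hc, if_neg hsp, if_neg hq]
          by_cases hlast : k = cs.length - 1
          · have hnil : l' = [] := List.length_eq_zero_iff.1 (by omega)
            have hdk : cs.drop k = [c] := by rw [← hdrop, hnil]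
            rw [if_pos hlast, hnil]
            simp [enumFrom, hdk, hsp]
          · have hne' : l' ≠ [] := by
              intro hnil
              exact hlast (by rw [hnil] at hlen'; simp at hlen'; omega)
            rw [if_neg hlast, ih2 acc ' ' [c] k (Nat.lt_succ_self k) hne']
            have hdk : cs.drop k = c :: cs.drop (k + 1) := by rw [← hdrop, hdrop']
            rw [show ([c] : List Char) = [] ++ [c] from rfl, ← tokenRes_cons cs k ' ' c [] hdk hsp]
            congr 1
    · -- in option at k, delimiter d, prefix o, start s < k
      intro acc d o s hs hne
      by_cases hd : c = d
      · -- closing delimiter: A appends the option and leaves it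
        have hstep : stepA cs.length (acc, d, o, true, s) (k, c) =
            (acc ++ [String.mk o], d, [], false, s) := by
          subst hd
          by_cases hsp : c = ' ' <;> simp [stepA, hsp, hs]
        simp only [enumFrom, List.foldl_cons, hstep]
        rw [ih1 (acc ++ [String.mk o]) d s]
        have hidx : (cs.drop k).idxOf? d = some 0 := by
          rw [← hdrop, idxOf?_cons_char, if_pos hd]
        simp [tokenRes, hidx]
      · -- ordinary char: accumulate it into the option
        have hstep : stepA cs.length (acc, d, o, true, s) (k, c) =
            (if k = cs.length - 1 then (acc ++ [String.mk (o ++ [c])], d, [], true, s)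
             else (acc, d, o ++ [c], true, s)) := by
          simp [stepA, hd, hs]
        have hidx : (cs.drop k).idxOf? d = ((cs.drop (k + 1)).idxOf? d).map (· + 1) := by
          rw [← hdrop, hdrop', idxOf?_cons_char, if_neg hd]
        simp only [enumFrom, List.foldl_cons, hstep]
        by_cases hlast : k = cs.length - 1
        · have hnil : l' = [] := List.length_eq_zero_iff.1 (by omega)
          have hdk : cs.drop k = [c] := by rw [← hdrop, hnil]
          rw [if_pos hlast, hnil]
          simp [enumFrom, tokenRes, hdk, hd]
        · have hne' : l' ≠ [] := by
            intro hnil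
            exact hlast (by rw [hnil] at hlen'; simp at hlen'; omega)
          rw [if_neg hlast, ih2 acc d (o ++ [c]) s (by omega) hne']
          have hdk : cs.drop k = c :: cs.drop (k + 1) := by rw [← hdrop, hdrop']
          rw [← tokenRes_cons cs k d c o hdk hd]

-- ===== VERDICT (by name: the statement is the Claim_ definition above) =====
theorem parseTypedAction_spec : Claim_equal_parseTypedAction := by
  intro action _
  unfold Spec_parseTypedAction parseTypedAction parseTypedAction_alt
  have h := (joint action.toList action.toList 0 (by simp) (by simp)).1 [] ' ' 0
  simpa [runA] using h
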